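-- pv_equiv track=rewrite | github.com/JohnVonChaos/REflexOS | docs/the_word.py | _extract_turn_sequence
-- ===== SOURCE A (Python) =====
-- def _extract_turn_sequence(mapping):
--     """Extract linear turn sequence from ChatGPT's tree-structured mapping.
--
--     ChatGPT messages are stored in a DAG; this linearizes them by following
--     parent/child relationships.
--     """
--     if not mapping:
--         return []
--
--     # Find root node (parent_id == None)
--     root_id = None
--     for node_id, node in mapping.items():
--         if node.get('parent') is None:
--             root_id = node_id
--             break
--
--     if not root_id:
--         # Fallback: just process in order
--         return list(mapping.values())
--
--     # Traverse tree depth-first to get linear sequence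
--     sequence = []
--     visited = set()
--
--     def traverse(node_id):
--         if node_id in visited or node_id not in mapping:
--             return
--         visited.add(node_id)
--
--         node = mapping[node_id]
--         sequence.append(node)
--
--         # Find children
--         for potential_child_id, potential_child in mapping.items():
--             if potential_child.get('parent') == node_id:
--                 traverse(potential_child_id)
--
--     traverse(root_id)
--     return sequence
-- ===== SOURCE B (Python) =====
-- def _extract_turn_sequence(mapping):
--     """Linearize ChatGPT's tree-structured mapping: same preorder as the
--     original, but with an explicit worklist stack instead of recursion, driven
--     by a parent->children index built in one pass (no rescan per node)."""
--     if not mapping: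
--         return []
--
--     root_id = None
--     for node_id, node in mapping.items():
--         if node.get('parent') is None:
--             root_id = node_id
--             break
--
--     if not root_id:
--         # Fallback: just process in order
--         return list(mapping.values())
--
--     # Parent -> children index, one pass in mapping order.
--     children = {}
--     for child_id, child in mapping.items():
--         parent = child.get('parent')
--         if parent is not None:
--             children.setdefault(parent, []).append(child_id)
--
--     sequence = []
--     visited = set()
--     stack = [root_id]
--     while stack:
--         node_id = stack.pop()
--         if node_id in visited or node_id not in mapping:
--             continue
--         visited.add(node_id)
--         sequence.append(mapping[node_id])
--         # push in reversed order so children pop in mapping order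
--         stack.extend(reversed(children.get(node_id, [])))
--     return sequence
-- ===== Notes on version B (the rewrite author's own statement) =====
-- stated objective: alternative
-- what changed: B replaces the recursive DFS that rescans the whole mapping for children at every visited node with an explicit worklist stack (visited checked at pop, children pushed in reversed order) driven by a parent->children index built in one pass.
import Mathlib
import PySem

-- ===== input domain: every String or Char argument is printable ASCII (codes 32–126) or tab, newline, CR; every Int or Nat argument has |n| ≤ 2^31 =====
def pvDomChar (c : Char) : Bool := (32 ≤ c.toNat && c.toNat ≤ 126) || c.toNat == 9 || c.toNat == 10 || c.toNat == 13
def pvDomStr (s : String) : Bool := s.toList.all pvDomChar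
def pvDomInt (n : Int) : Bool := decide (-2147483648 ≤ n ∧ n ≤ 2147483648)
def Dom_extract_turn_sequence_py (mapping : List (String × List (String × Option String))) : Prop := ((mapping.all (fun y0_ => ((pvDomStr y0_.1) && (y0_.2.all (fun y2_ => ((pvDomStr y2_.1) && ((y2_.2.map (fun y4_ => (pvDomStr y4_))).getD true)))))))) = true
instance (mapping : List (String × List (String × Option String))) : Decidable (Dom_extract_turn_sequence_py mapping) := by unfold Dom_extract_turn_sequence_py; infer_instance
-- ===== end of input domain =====

-- B replaces A's recursive, mapping-rescanning DFS by an explicit worklist stack over a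
-- parent→children index built in one pass (objective: alternative; same return value).

-- ===== PORT A =====
-- node.get('parent'): first-match lookup in the node dict; missing key and stored None both give none (Python's `is None`).
def getParent (node : List (String × Option String)) : Option String :=
  ((node.find? (fun kv => kv.1 == "parent")).map (·.2)).getD none

-- mapping[k] / `k in mapping`: first-match lookup over the mapping's items.
def mlookup (mapping : List (String × List (String × Option String))) (k : String) :
    Option (List (String × Option String)) :=
  (mapping.find? (fun kv => kv.1 == k)).map (·.2)

-- A's recursive `traverse`, state = (visited set, sequence); fuel `mapping.length + 1`
-- bounds the recursion depth (each executing level adds a distinct mapping key to visited,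
-- so the fuel is never exhausted — a totality guard only, not an algorithm change).
def travA (mapping : List (String × List (String × Option String))) :
    Nat → (PySem.Set String × List (List (String × Option String))) → String →
    (PySem.Set String × List (List (String × Option String)))
  | 0, st, _ => st
  | f + 1, st, nid =>
    if st.1.contains nid then st
    else
      match mlookup mapping nid with
      | none => st
      | some node =>
        mapping.foldl
          (fun acc kv => if getParent kv.2 == some nid then travA mapping f acc kv.1 else acc)
          (PySem.Set.add st.1 nid, st.2 ++ [node])

def extract_turn_sequence_py (mapping : List (String × List (String × Option String))) : List (List (String × Option String)) :=
  if mapping.isEmpty then []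
  else
    -- root-finding loop with break = first item whose 'parent' is None
    match mapping.find? (fun kv => getParent kv.2 == none) with
    | none => mapping.map (·.2)              -- `if not root_id` (root_id is None)
    | some rkv =>
      if rkv.1 = "" then mapping.map (·.2)   -- `if not root_id` (falsy empty-string id)
      else (travA mapping (mapping.length + 1) (PySem.Set.empty, []) rkv.1).2

-- ===== PORT B =====
-- children.setdefault(parent, []).append(child_id), one pass over the mapping.
def childIdx (mapping : List (String × List (String × Option String))) :
    PySem.Dict String (List String) :=
  mapping.foldl
    (fun d kv =>
      match getParent kv.2 with
      | none => d
      | some p => d.insert p (d.getD p [] ++ [kv.1]))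
    PySem.Dict.empty

-- Number of mapping entries whose key is not yet visited: the while-loop's
-- termination measure (the loop body cites it in `termination_by`).
def unvisCnt (mapping : List (String × List (String × Option String)))
    (vis : PySem.Set String) : Nat :=
  (mapping.filter (fun kv => !vis.contains kv.1)).length

-- (general counting facts the termination lemma needs)
theorem length_filter_le_of_imp {α : Type} (p q : α → Bool) :
    ∀ l : List α, (∀ x ∈ l, q x = true → p x = true) →
      (l.filter q).length ≤ (l.filter p).length := by
  intro l
  induction l with
  | nil => intro _; simp
  | cons a t ih =>
    intro h
    have ht := ih (fun x hx => h x (List.mem_cons_of_mem _ hx))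
    by_cases hq : q a = true
    · have hp := h a (List.mem_cons_self) hq
      rw [List.filter_cons, List.filter_cons, if_pos hq, if_pos hp]
      simpa using Nat.succ_le_succ ht
    · rw [List.filter_cons, List.filter_cons, if_neg hq]
      by_cases hp : p a = true
      · rw [if_pos hp]; simpa using Nat.le_succ_of_le ht
      · rw [if_neg hp]; exact ht

theorem length_filter_lt_of_witness {α : Type} (p q : α → Bool) :
    ∀ l : List α, (∀ x ∈ l, q x = true → p x = true) →
      ∀ x ∈ l, p x = true → q x = false →
      (l.filter q).length < (l.filter p).length := by
  intro l
  induction l with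
  | nil => intro _ x hx; simp at hx
  | cons a t ih =>
    intro h x hx hp hq
    have ht_le := length_filter_le_of_imp p q t (fun y hy => h y (List.mem_cons_of_mem _ hy))
    rcases List.mem_cons.1 hx with rfl | hxt
    · rw [List.filter_cons, List.filter_cons, if_pos hp, if_neg (by simp [hq])]
      simpa using Nat.lt_succ_of_le ht_le
    · have hlt := ih (fun y hy => h y (List.mem_cons_of_mem _ hy)) x hxt hp hq
      rw [List.filter_cons, List.filter_cons]
      by_cases hqa : q a = true
      · rw [if_pos hqa, if_pos (h a (List.mem_cons_self) hqa)]
        simpa using Nat.succ_lt_succ hlt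
      · rw [if_neg hqa]
        by_cases hpa : p a = true
        · rw [if_pos hpa]; simpa using Nat.lt_succ_of_lt hlt
        · rw [if_neg hpa]; exact hlt

-- adding an element never removes membership
theorem contains_add_of_contains (vis : PySem.Set String) (nid y : String)
    (hy : vis.contains y = true) : (PySem.Set.add vis nid).contains y = true := by
  rw [PySem.Set.contains_iff] at hy ⊢
  exact (PySem.Set.mem_add _ _ _).2 (Or.inl hy)

-- Termination lemma for the loop port: processing an unvisited key of the mapping
-- strictly shrinks the count of unvisited mapping entries.
theorem unvisCnt_add_lt (mapping : List (String × List (String × Option String)))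
    (vis : PySem.Set String) (nid : String) (node : List (String × Option String))
    (h1 : ¬ vis.contains nid = true) (h2 : mlookup mapping nid = some node) :
    unvisCnt mapping (PySem.Set.add vis nid) < unvisCnt mapping vis := by
  obtain ⟨kv0, hfind, -⟩ : ∃ kv0, mapping.find? (fun kv => kv.1 == nid) = some kv0 ∧ kv0.2 = node := by
    unfold mlookup at h2
    cases hf : mapping.find? (fun kv => kv.1 == nid) with
    | none => simp [hf] at h2
    | some kv0 => exact ⟨kv0, rfl, by simpa [hf] using h2⟩
  have hmem : kv0 ∈ mapping := List.mem_of_find?_eq_some hfind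
  have hkey : kv0.1 = nid := by simpa using List.find?_some hfind
  unfold unvisCnt
  apply length_filter_lt_of_witness _ _ mapping ?mono kv0 hmem ?hp ?hq
  case mono =>
    intro x _ hqx
    cases hv : vis.contains x.1 with
    | false => simp
    | true => rw [contains_add_of_contains vis nid x.1 hv] at hqx; simp at hqx
  case hp =>
    rw [hkey]
    cases hv : vis.contains nid with
    | false => simp
    | true => exact absurd hv h1
  case hq =>
    rw [hkey]
    simp [PySem.Set.mem_add]

-- B's while loop: the Python stack pops from the tail and extends with
-- reversed(children); ported with the TOP OF THE STACK AT THE HEAD, so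
-- pop = head and pushing reversed(children) at the tail = consing children
-- in mapping order at the head (exact same pop order).
def loopB (mapping : List (String × List (String × Option String)))
    (children : PySem.Dict String (List String)) :
    List String → (PySem.Set String × List (List (String × Option String))) →
    (PySem.Set String × List (List (String × Option String)))
  | [], st => st
  | nid :: rest, st =>
    if h1 : st.1.contains nid = true then loopB mapping children rest st
    else
      match h2 : mlookup mapping nid with
      | none => loopB mapping children rest st
      | some node =>
        loopB mapping children (children.getD nid [] ++ rest)
          (PySem.Set.add st.1 nid, st.2 ++ [node])
termination_by stack st => (unvisCnt mapping st.1, stack.length)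
decreasing_by
  · exact Prod.Lex.right _ (by simp)
  · exact Prod.Lex.right _ (by simp)
  · exact Prod.Lex.left _ _ (unvisCnt_add_lt mapping st.1 nid node h1 h2)

def extract_turn_sequence_py_alt (mapping : List (String × List (String × Option String))) : List (List (String × Option String)) :=
  if mapping.isEmpty then []
  else
    match mapping.find? (fun kv => getParent kv.2 == none) with
    | none => mapping.map (·.2)
    | some rkv =>
      if rkv.1 = "" then mapping.map (·.2)
      else (loopB mapping (childIdx mapping) [rkv.1] (PySem.Set.empty, [])).2

-- ===== PRECONDITION & SPEC =====
def Spec_extract_turn_sequence_py (mapping : List (String × List (String × Option String))) (out : List (List (String × Option String))) : Prop := out = extract_turn_sequence_py_alt mapping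
instance (mapping : List (String × List (String × Option String))) (out : List (List (String × Option String))) : Decidable (Spec_extract_turn_sequence_py mapping out) := by unfold Spec_extract_turn_sequence_py; infer_instance

-- ===== CLAIM (what is proved, stated in full; the proofs are below) =====
def Claim_equal_extract_turn_sequence_py : Prop := ∀ (mapping : List (String × List (String × Option String))), Dom_extract_turn_sequence_py mapping → Spec_extract_turn_sequence_py mapping (extract_turn_sequence_py mapping)

-- ===== LEMMAS AND PROOFS =====

-- Proof-side intermediate: A's recursion but reading children from the index.
def travR (mapping : List (String × List (String × Option String)))
    (children : PySem.Dict String (List String)) :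
    Nat → (PySem.Set String × List (List (String × Option String))) → String →
    (PySem.Set String × List (List (String × Option String)))
  | 0, st, _ => st
  | f + 1, st, nid =>
    if st.1.contains nid then st
    else
      match mlookup mapping nid with
      | none => st
      | some node =>
        (children.getD nid []).foldl
          (fun acc cid => travR mapping children f acc cid)
          (PySem.Set.add st.1 nid, st.2 ++ [node])

-- A's conditional fold over the whole mapping is the fold of the recursive call over the child keys.
theorem foldA_eq_kids (l : List (String × List (String × Option String))) (nid : String)
    (F : (PySem.Set String × List (List (String × Option String))) → String →
         (PySem.Set String × List (List (String × Option String))))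
    (st : PySem.Set String × List (List (String × Option String))) :
    l.foldl (fun acc kv => if getParent kv.2 == some nid then F acc kv.1 else acc) st
      = (l.filterMap (fun kv => if getParent kv.2 == some nid then some kv.1 else none)).foldl F st := by
  induction l generalizing st with
  | nil => rfl
  | cons kv t ih =>
    rw [List.foldl_cons, List.filterMap_cons]
    by_cases h : (getParent kv.2 == some nid) = true
    · rw [if_pos h, if_pos h]; exact ih (F st kv.1)
    · rw [if_neg h, if_neg h]; exact ih st

-- The child index looks up exactly the children list A scans for.
theorem childIdx_getD (l : List (String × List (String × Option String)))
    (d : PySem.Dict String (List String)) (p : String) :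
    (l.foldl (fun d kv =>
        match getParent kv.2 with
        | none => d
        | some q => d.insert q (d.getD q [] ++ [kv.1])) d).getD p []
      = d.getD p [] ++ l.filterMap (fun kv => if getParent kv.2 == some p then some kv.1 else none) := by
  induction l generalizing d with
  | nil => simp
  | cons kv t ih =>
    simp only [List.foldl, List.filterMap_cons]
    cases hq : getParent kv.2 with
    | none => simp [ih]
    | some q =>
      by_cases hpq : p = q
      · subst hpq
        simp [ih]
      · have : ¬ ((some q : Option String) == some p) = true := by
          simp [beq_iff_eq]; exact fun h => hpq h.symm
        simp [ih, PySem.Dict.getD_insert, hpq, this]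

theorem trav_eq (mapping : List (String × List (String × Option String))) :
    ∀ (f : Nat) (st : PySem.Set String × List (List (String × Option String))) (nid : String),
      travA mapping f st nid = travR mapping (childIdx mapping) f st nid := by
  intro f
  induction f with
  | zero => intro st nid; rfl
  | succ f ih =>
    intro st nid
    simp only [travA, travR]
    cases hv : st.1.contains nid with
    | true => simp
    | false =>
      simp only [Bool.false_eq_true, if_false]
      cases mlookup mapping nid with
      | none => rfl
      | some node =>
        dsimp only
        rw [foldA_eq_kids]
        have hidx : (childIdx mapping).getD nid []
            = mapping.filterMap (fun kv => if getParent kv.2 == some nid then some kv.1 else none) := by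
          have := childIdx_getD mapping PySem.Dict.empty nid
          simpa [childIdx] using this
        rw [hidx]
        have hfun : travA mapping f
            = fun acc cid => travR mapping (childIdx mapping) f acc cid :=
          funext fun acc => funext fun cid => ih acc cid
        rw [hfun]

-- fold congruence under an invariant preserved by the left function
theorem foldl_congr_inv {α β : Type} (I : β → Prop) (g g' : β → α → β)
    (hstep : ∀ acc x, I acc → g acc x = g' acc x ∧ I (g acc x)) :
    ∀ (l : List α) (b : β), I b → l.foldl g b = l.foldl g' b := by
  intro l
  induction l with
  | nil => intro b _; rfl
  | cons a t ih =>
    intro b hb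
    rw [List.foldl_cons, List.foldl_cons, ← (hstep b a hb).1]
    exact ih (g b a) (hstep b a hb).2

-- visited only grows under travR
theorem travR_vis_mono (mapping : List (String × List (String × Option String)))
    (children : PySem.Dict String (List String)) :
    ∀ (f : Nat) (st : PySem.Set String × List (List (String × Option String))) (nid k : String),
      k ∈ st.1 → k ∈ (travR mapping children f st nid).1 := by
  intro f
  induction f with
  | zero => intro st nid k h; exact h
  | succ f ih =>
    intro st nid k hk
    simp only [travR]
    by_cases h1 : st.1.contains nid = true
    · rw [if_pos h1]; exact hk
    · rw [if_neg h1]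
      cases h2 : mlookup mapping nid with
      | none => exact hk
      | some node =>
        have hbase : k ∈ (PySem.Set.add st.1 nid, st.2 ++ [node]).1 :=
          (PySem.Set.mem_add _ _ _).2 (Or.inl hk)
        exact List.foldlRecOn (motive := fun r => k ∈ r.1) _ _ hbase
          (fun b hb a _ => ih b a k hb)

-- fewer unvisited entries for a larger visited set
theorem unvisCnt_mono (mapping : List (String × List (String × Option String)))
    (v v' : PySem.Set String) (h : ∀ j, j ∈ v → j ∈ v') :
    unvisCnt mapping v' ≤ unvisCnt mapping v := by
  unfold unvisCnt
  apply length_filter_le_of_imp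
  intro x _ hqx
  cases hv : v.contains x.1 with
  | false => simp
  | true =>
    have : v'.contains x.1 = true := by
      rw [PySem.Set.contains_iff] at hv ⊢
      exact h _ hv
    rw [this] at hqx; simp at hqx

-- fuel irrelevance: any fuel exceeding the unvisited count computes the same result
theorem travR_fuel_irrel (mapping : List (String × List (String × Option String))) :
    ∀ (n : Nat) (st : PySem.Set String × List (List (String × Option String))) (nid : String)
      (f f' : Nat), unvisCnt mapping st.1 = n → n < f → n < f' →
      travR mapping (childIdx mapping) f st nid = travR mapping (childIdx mapping) f' st nid := by
  intro n
  induction n using Nat.strong_induction_on with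
  | _ n IH =>
    intro st nid f f' hn hf hf'
    obtain ⟨f0, rfl⟩ : ∃ k, f = k + 1 := ⟨f - 1, by omega⟩
    obtain ⟨f1, rfl⟩ : ∃ k, f' = k + 1 := ⟨f' - 1, by omega⟩
    simp only [travR]
    by_cases h1 : st.1.contains nid = true
    · rw [if_pos h1, if_pos h1]
    · rw [if_neg h1, if_neg h1]
      cases h2 : mlookup mapping nid with
      | none => rfl
      | some node =>
        have hlt : unvisCnt mapping (PySem.Set.add st.1 nid) < n :=
          hn ▸ unvisCnt_add_lt mapping st.1 nid node h1 h2
        apply foldl_congr_inv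
          (I := fun acc => ∀ j, j ∈ (PySem.Set.add st.1 nid : PySem.Set String) → j ∈ acc.1)
        · intro acc x hI
          have hle : unvisCnt mapping acc.1 ≤ unvisCnt mapping (PySem.Set.add st.1 nid) :=
            unvisCnt_mono mapping _ _ hI
          refine ⟨IH (unvisCnt mapping acc.1) (by omega) acc x f0 f1 rfl (by omega) (by omega), ?_⟩
          intro j hj
          exact travR_vis_mono mapping (childIdx mapping) f0 acc x j (hI j hj)
        · intro j hj; exact hj

-- the canonical (fuel-sufficient) step function
def travInf (mapping : List (String × List (String × Option String)))
    (st : PySem.Set String × List (List (String × Option String))) (nid : String) :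
    PySem.Set String × List (List (String × Option String)) :=
  travR mapping (childIdx mapping) (unvisCnt mapping st.1 + 1) st nid

-- the worklist loop folds the canonical step over the stack
theorem loop_eq_fold (mapping : List (String × List (String × Option String))) :
    ∀ (n : Nat) (stack : List String) (st : PySem.Set String × List (List (String × Option String))),
      unvisCnt mapping st.1 < n →
      loopB mapping (childIdx mapping) stack st = stack.foldl (travInf mapping) st := by
  intro n
  induction n with
  | zero => intro stack st h; omega
  | succ n IH =>
    intro stack st h
    induction stack with
    | nil => rw [loopB]; rfl
    | cons nid rest ihrest =>
      rw [loopB]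
      by_cases h1 : st.1.contains nid = true
      · rw [dif_pos h1, ihrest, List.foldl_cons]
        have hstep : travInf mapping st nid = st := by
          unfold travInf; simp only [travR]; rw [if_pos h1]
        rw [hstep]
      · rw [dif_neg h1]
        split
        next h2 =>
          rw [ihrest, List.foldl_cons]
          have hstep : travInf mapping st nid = st := by
            unfold travInf; simp only [travR]; rw [if_neg h1]; simp only [h2]
          rw [hstep]
        next node h2 =>
          have hlt : unvisCnt mapping (PySem.Set.add st.1 nid) < unvisCnt mapping st.1 :=
            unvisCnt_add_lt mapping st.1 nid node h1 h2
          have hrec : loopB mapping (childIdx mapping)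
                ((childIdx mapping).getD nid [] ++ rest) (PySem.Set.add st.1 nid, st.2 ++ [node])
              = ((childIdx mapping).getD nid [] ++ rest).foldl (travInf mapping)
                  (PySem.Set.add st.1 nid, st.2 ++ [node]) := by
            apply IH
            simp only []
            omega
          rw [hrec, List.foldl_append, List.foldl_cons]
          have hstep1 : travInf mapping st nid
              = ((childIdx mapping).getD nid []).foldl
                  (fun acc cid => travR mapping (childIdx mapping) (unvisCnt mapping st.1) acc cid)
                  (PySem.Set.add st.1 nid, st.2 ++ [node]) := by
            unfold travInf
            simp only [travR]
            rw [if_neg h1]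
            simp only [h2]
          have hstep2 : ((childIdx mapping).getD nid []).foldl
                  (fun acc cid => travR mapping (childIdx mapping) (unvisCnt mapping st.1) acc cid)
                  (PySem.Set.add st.1 nid, st.2 ++ [node])
              = ((childIdx mapping).getD nid []).foldl (travInf mapping)
                  (PySem.Set.add st.1 nid, st.2 ++ [node]) := by
            apply foldl_congr_inv
              (I := fun acc => ∀ j, j ∈ (PySem.Set.add st.1 nid : PySem.Set String) → j ∈ acc.1)
            · intro acc x hI
              have hle : unvisCnt mapping acc.1 ≤ unvisCnt mapping (PySem.Set.add st.1 nid) :=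
                unvisCnt_mono mapping _ _ hI
              refine ⟨?_, fun j hj => travR_vis_mono mapping (childIdx mapping) _ acc x j (hI j hj)⟩
              exact travR_fuel_irrel mapping (unvisCnt mapping acc.1) acc x _ _ rfl
                (by omega) (by omega)
            · intro j hj; exact hj
          rw [hstep1, hstep2]

-- ===== VERDICT (by name: the statement is the Claim_ definition above) =====
theorem extract_turn_sequence_py_spec : Claim_equal_extract_turn_sequence_py := by
  intro mapping _
  unfold Spec_extract_turn_sequence_py extract_turn_sequence_py extract_turn_sequence_py_alt
  by_cases he : mapping.isEmpty
  · simp [he]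
  · simp only [he]
    cases mapping.find? (fun kv => getParent kv.2 == none) with
    | none => rfl
    | some rkv =>
      by_cases hr : rkv.1 = ""
      · simp [hr]
      · simp only [hr, if_false]
        have hu0 : unvisCnt mapping (PySem.Set.empty : PySem.Set String) ≤ mapping.length := by
          unfold unvisCnt
          exact List.length_filter_le _ _
        have h1 : travA mapping (mapping.length + 1) (PySem.Set.empty, []) rkv.1
            = travInf mapping (PySem.Set.empty, []) rkv.1 := by
          rw [trav_eq]
          unfold travInf
          exact travR_fuel_irrel mapping (unvisCnt mapping (PySem.Set.empty : PySem.Set String))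
            (PySem.Set.empty, []) rkv.1 _ _ rfl (by omega) (Nat.lt_succ_self _)
        have h2 : loopB mapping (childIdx mapping) [rkv.1] (PySem.Set.empty, [])
            = [rkv.1].foldl (travInf mapping) (PySem.Set.empty, []) :=
          loop_eq_fold mapping (unvisCnt mapping (PySem.Set.empty : PySem.Set String) + 1) _ _
            (Nat.lt_succ_self _)
        rw [h1, h2, List.foldl_cons, List.foldl_nil]
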